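-- pv_equiv track=rewrite | github.com/ANISIMOV-STUDIO/IOT_App | scripts/replace_colors.py | add_hvac_ui_kit_import
-- ===== SOURCE A (Python) =====
-- from typing import Dict, List, Tuple
--
-- def add_hvac_ui_kit_import(content: str) -> Tuple[str, bool]:
--     """Add hvac_ui_kit import if not present and HvacColors is used."""
--     if 'HvacColors' not in content:
--         return content, False
--
--     if "import 'package:hvac_ui_kit/hvac_ui_kit.dart';" in content:
--         return content, False
--
--     # Find the position to insert the import
--     # Insert after other package imports but before relative imports
--     lines = content.split('\n')
--     insert_pos = 0
--
--     for i, line in enumerate(lines):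
--         if line.startswith('import '):
--             insert_pos = i + 1
--             if "'package:flutter/" in line or "'package:hvac_ui_kit/" in line:
--                 continue
--             elif "'package:" in line:
--                 # Insert before other package imports (after flutter)
--                 insert_pos = i
--                 break
--
--     # Insert the import
--     lines.insert(insert_pos, "import 'package:hvac_ui_kit/hvac_ui_kit.dart';")
--
--     return '\n'.join(lines), True
-- ===== SOURCE B (Python) =====
-- def add_hvac_ui_kit_import(content: str):
--     """Add hvac_ui_kit import if not present and HvacColors is used."""
--     if 'HvacColors' not in content:
--         return content, False
--     if "import 'package:hvac_ui_kit/hvac_ui_kit.dart';" in content: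
--         return content, False
--
--     lines = content.split('\n')
--
--     def is_other_package(line):
--         return (line.startswith('import ')
--                 and "'package:" in line
--                 and "'package:flutter/" not in line
--                 and "'package:hvac_ui_kit/" not in line)
--
--     # First non-flutter, non-hvac package import: insert right before it.
--     pos = next((i for i, line in enumerate(lines) if is_other_package(line)), None)
--     if pos is None:
--         # Otherwise: right after the last import line, or at the top.
--         imports = [i for i, line in enumerate(lines) if line.startswith('import ')]
--         pos = imports[-1] + 1 if imports else 0
--
--     lines.insert(pos, "import 'package:hvac_ui_kit/hvac_ui_kit.dart';")
--     return '\n'.join(lines), True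
-- ===== Notes on version B (the rewrite author's own statement) =====
-- stated objective: simpler
-- what changed: A's single stateful loop with a mutable insert_pos and a break is replaced by two declarative scans: find the first non-flutter/non-hvac package import (insert before it), else append after the last import line (or at the top).
import Mathlib
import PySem

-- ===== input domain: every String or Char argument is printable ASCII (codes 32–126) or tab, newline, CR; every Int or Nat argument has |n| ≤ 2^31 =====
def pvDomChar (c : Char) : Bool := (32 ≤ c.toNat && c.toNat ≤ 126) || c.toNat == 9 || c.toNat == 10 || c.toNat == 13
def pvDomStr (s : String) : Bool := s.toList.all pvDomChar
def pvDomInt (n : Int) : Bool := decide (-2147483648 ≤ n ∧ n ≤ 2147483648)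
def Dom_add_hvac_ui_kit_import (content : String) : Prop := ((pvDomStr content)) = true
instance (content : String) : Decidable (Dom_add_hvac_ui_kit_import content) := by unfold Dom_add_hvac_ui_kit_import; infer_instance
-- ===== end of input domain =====

-- B replaces A's single stateful break-carrying loop by two declarative scans
-- (first "other-package" import, else last import line); objective: simpler.

-- ===== PORT A =====
-- A's for-loop over enumerate(lines), carrying the mutable insert_pos; break returns i.
def aLoop : List (Int × String) → Int → Int
  | [], pos => pos
  | (i, line) :: rest, pos =>
    if PySem.Str.startswith line "import " then
      if PySem.Str.isIn "'package:flutter/" line || PySem.Str.isIn "'package:hvac_ui_kit/" line then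
        aLoop rest (i + 1)
      else if PySem.Str.isIn "'package:" line then
        i          -- break with insert_pos = i
      else
        aLoop rest (i + 1)
    else
      aLoop rest pos

def add_hvac_ui_kit_import (content : String) : String × Bool :=
  if !(PySem.Str.isIn "HvacColors" content) then (content, false)
  else if PySem.Str.isIn "import 'package:hvac_ui_kit/hvac_ui_kit.dart';" content then (content, false)
  else
    -- content.split('\n'): the separator "\n" is non-empty, so split? is always `some`
    let lines := (PySem.Str.split? content "\n").getD []
    let insertPos := aLoop (PySem.List.enumerate lines 0) 0
    (PySem.Str.join "\n" (PySem.List.insert lines insertPos "import 'package:hvac_ui_kit/hvac_ui_kit.dart';"), true)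

-- ===== PORT B =====
def bIsOtherPackage (line : String) : Bool :=
  PySem.Str.startswith line "import "
    && PySem.Str.isIn "'package:" line
    && !(PySem.Str.isIn "'package:flutter/" line)
    && !(PySem.Str.isIn "'package:hvac_ui_kit/" line)

def add_hvac_ui_kit_import_alt (content : String) : String × Bool :=
  if !(PySem.Str.isIn "HvacColors" content) then (content, false)
  else if PySem.Str.isIn "import 'package:hvac_ui_kit/hvac_ui_kit.dart';" content then (content, false)
  else
    let lines := (PySem.Str.split? content "\n").getD []
    let e := PySem.List.enumerate lines 0
    -- pos = next((i for i, line in enumerate(lines) if is_other_package(line)), None)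
    let pos : Int :=
      match e.find? (fun p => bIsOtherPackage p.2) with
      | some p => p.1
      | none =>
        -- imports = [i for i, line in enumerate(lines) if line.startswith('import ')]
        -- pos = imports[-1] + 1 if imports else 0
        match (e.filter (fun p => PySem.Str.startswith p.2 "import ")).getLast? with
        | some p => p.1 + 1
        | none => 0
    (PySem.Str.join "\n" (PySem.List.insert lines pos "import 'package:hvac_ui_kit/hvac_ui_kit.dart';"), true)

-- ===== PRECONDITION & SPEC =====
def Spec_add_hvac_ui_kit_import (content : String) (out : String × Bool) : Prop := out = add_hvac_ui_kit_import_alt content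
instance (content : String) (out : String × Bool) : Decidable (Spec_add_hvac_ui_kit_import content out) := by unfold Spec_add_hvac_ui_kit_import; infer_instance

-- ===== CLAIM (what is proved, stated in full; the proofs are below) =====
def Claim_equal_add_hvac_ui_kit_import : Prop := ∀ (content : String), Dom_add_hvac_ui_kit_import content → Spec_add_hvac_ui_kit_import content (add_hvac_ui_kit_import content)

-- ===== LEMMAS AND PROOFS =====

-- A's loop computes B's two-scan position, for any incoming fallback pos.
theorem aLoop_eq (e : List (Int × String)) (pos : Int) :
    aLoop e pos =
      (match e.find? (fun p => bIsOtherPackage p.2) with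
       | some p => p.1
       | none =>
         match (e.filter (fun p => PySem.Str.startswith p.2 "import ")).getLast? with
         | some p => p.1 + 1
         | none => pos) := by
  induction e generalizing pos with
  | nil => rfl
  | cons hd rest ih =>
    obtain ⟨i, line⟩ := hd
    by_cases himp : PySem.Str.startswith line "import " = true
    · by_cases hfl : (PySem.Str.isIn "'package:flutter/" line
                        || PySem.Str.isIn "'package:hvac_ui_kit/" line) = true
      · -- flutter / hvac_ui_kit package import: continue with pos = i + 1
        have hb : bIsOtherPackage line = false := by
          rcases Bool.or_eq_true _ _ |>.mp hfl with h | h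
          · simp only [bIsOtherPackage, h, Bool.not_true, Bool.and_false, Bool.false_and]
          · simp only [bIsOtherPackage, h, Bool.not_true, Bool.and_false]
        simp only [aLoop, if_pos hfl, List.find?, List.filter, hb, himp, ih (i + 1)]
        cases hrest : (rest.filter (fun p => PySem.Str.startswith p.2 "import ")).getLast? with
        | none =>
          simp only [List.getLast?_cons, hrest, Option.getD_none, if_true]
        | some v =>
          simp only [List.getLast?_cons, hrest, Option.getD_some, if_true]
      · by_cases hpk : PySem.Str.isIn "'package:" line = true
        · -- other package import: break, insert_pos = i
          have hb : bIsOtherPackage line = true := by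
            have h1 : PySem.Str.isIn "'package:flutter/" line = false := by
              revert hfl; cases PySem.Str.isIn "'package:flutter/" line <;> simp
            have h2 : PySem.Str.isIn "'package:hvac_ui_kit/" line = false := by
              revert hfl; cases PySem.Str.isIn "'package:hvac_ui_kit/" line <;> simp
            simp only [bIsOtherPackage, himp, hpk, h1, h2, Bool.not_false ,Bool.and_self]
          simp only [aLoop, if_pos himp, if_neg hfl, if_pos hpk, List.find?, hb]
        · -- an import line without 'package: : continue with pos = i + 1
          have hpk' : PySem.Str.isIn "'package:" line = false := by
            revert hpk; cases PySem.Str.isIn "'package:" line <;> simp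
          have hb : bIsOtherPackage line = false := by
            simp only [bIsOtherPackage, hpk', Bool.and_false, Bool.false_and]
          simp only [aLoop, if_neg hfl, if_neg hpk, List.find?, List.filter, hb,
            himp, ih (i + 1)]
          cases hrest : (rest.filter (fun p => PySem.Str.startswith p.2 "import ")).getLast? with
          | none =>
            simp only [List.getLast?_cons, hrest, Option.getD_none, if_true]
          | some v =>
            simp only [List.getLast?_cons, hrest, Option.getD_some, if_true]
    · -- not an import line: skipped by every scan
      have himp' : PySem.Str.startswith line "import " = false := by
        revert himp; cases PySem.Str.startswith line "import " <;> simp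
      have hb : bIsOtherPackage line = false := by
        simp only [bIsOtherPackage, himp', Bool.false_and]
      simp only [aLoop, List.find?, List.filter, hb, himp', ih pos, Bool.false_eq_true, if_false]

-- ===== VERDICT (by name: the statement is the Claim_ definition above) =====
theorem add_hvac_ui_kit_import_spec : Claim_equal_add_hvac_ui_kit_import := by
  intro content _
  show _ = _
  unfold add_hvac_ui_kit_import add_hvac_ui_kit_import_alt
  split_ifs with h1 h2
  · rfl
  · rfl
  · simp only [aLoop_eq]
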